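-- pv_equiv track=rewrite | github.com/kokpenbek/pqc-tls-benchmark | scripts/parse_pcap.py | find_tcp_handshake
-- ===== SOURCE A (Python) =====
-- def s(row, key):
--     v = row.get(key, "")
--     return v.strip() if v else ""
--
-- def is_true_value(v):
--     v = (v or "").strip().lower()
--     return v in {"1", "true", "yes"}
--
-- def is_syn(row):
--     """Identifies a TCP SYN packet"""
--     return is_true_value(s(row, "tcp.flags.syn")) and not is_true_value(s(row, "tcp.flags.ack"))
--
-- def is_synack(row):
--     """Identifies a TCP ACK packet"""
--     return is_true_value(s(row, "tcp.flags.syn")) and is_true_value(s(row, "tcp.flags.ack"))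
--
-- def is_ack_only(row):
--     """Identifies a pure TCP ACK packet"""
--     return (not is_true_value(s(row, "tcp.flags.syn"))) and is_true_value(s(row, "tcp.flags.ack"))
--
-- def same_direction(row, src_ip, src_port, dst_ip, dst_port):
--     return (
--         s(row, "ip.src") == src_ip and
--         s(row, "tcp.srcport") == src_port and
--         s(row, "ip.dst") == dst_ip and
--         s(row, "tcp.dstport") == dst_port
--     )
--
-- def find_tcp_handshake(rows):
--     syn = None
--     synack = None
--     ack = None
--
--     client_ip = None
--     client_port = None
--     server_ip = None
--     server_port = None
--
--     for row in rows:
--         if syn is None and is_syn(row):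
--             syn = row
--             client_ip = s(row, "ip.src")
--             client_port = s(row, "tcp.srcport")
--             server_ip = s(row, "ip.dst")
--             server_port = s(row, "tcp.dstport")
--             continue
--
--         if syn is not None and synack is None:
--             if is_synack(row) and same_direction(row, server_ip, server_port, client_ip, client_port):
--                 synack = row
--                 continue
--
--         if synack is not None and ack is None:
--             if is_ack_only(row) and same_direction(row, client_ip, client_port, server_ip, server_port):
--                 ack = row
--                 break
--
--     return syn, synack, ack, client_ip, client_port, server_ip, server_port
-- ===== SOURCE B (Python) =====
-- def s(row, key):
--     v = row.get(key, "")
--     return v.strip() if v else ""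
--
-- def is_true_value(v):
--     v = (v or "").strip().lower()
--     return v in {"1", "true", "yes"}
--
-- def is_syn(row):
--     return is_true_value(s(row, "tcp.flags.syn")) and not is_true_value(s(row, "tcp.flags.ack"))
--
-- def is_synack(row):
--     return is_true_value(s(row, "tcp.flags.syn")) and is_true_value(s(row, "tcp.flags.ack"))
--
-- def is_ack_only(row):
--     return (not is_true_value(s(row, "tcp.flags.syn"))) and is_true_value(s(row, "tcp.flags.ack"))
--
-- def same_direction(row, src_ip, src_port, dst_ip, dst_port):
--     return (
--         s(row, "ip.src") == src_ip and
--         s(row, "tcp.srcport") == src_port and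
--         s(row, "ip.dst") == dst_ip and
--         s(row, "tcp.dstport") == dst_port
--     )
--
-- def _first_index(xs, pred):
--     """Index of the first element satisfying pred, computed by filtering ALL
--     matching indices with a comprehension, or None if there is no match."""
--     hits = [i for i in range(len(xs)) if pred(xs[i])]
--     return hits[0] if hits else None
--
-- def find_tcp_handshake(rows):
--     rows = list(rows)
--     i = _first_index(rows, is_syn)
--     if i is None:
--         return None, None, None, None, None, None, None
--     syn = rows[i]
--     client_ip = s(syn, "ip.src")
--     client_port = s(syn, "tcp.srcport")
--     server_ip = s(syn, "ip.dst")
--     server_port = s(syn, "tcp.dstport")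
--     tail = rows[i + 1:]
--     j = _first_index(tail, lambda r: is_synack(r) and
--                      same_direction(r, server_ip, server_port, client_ip, client_port))
--     if j is None:
--         return syn, None, None, client_ip, client_port, server_ip, server_port
--     synack = tail[j]
--     tail2 = tail[j + 1:]
--     k = _first_index(tail2, lambda r: is_ack_only(r) and
--                      same_direction(r, client_ip, client_port, server_ip, server_port))
--     ack = tail2[k] if k is not None else None
--     return syn, synack, ack, client_ip, client_port, server_ip, server_port
-- ===== Notes on version B (the rewrite author's own statement) =====
-- stated objective: alternative
-- what changed: Replaces A's single online pass with None-guarded state-machine branches and early break by an offline index/slice computation: materialise the rows, compute the full list of matching indices for each handshake stage with a range comprehension, take its first element, and slice the list past it for the next stage.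
import Mathlib
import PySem

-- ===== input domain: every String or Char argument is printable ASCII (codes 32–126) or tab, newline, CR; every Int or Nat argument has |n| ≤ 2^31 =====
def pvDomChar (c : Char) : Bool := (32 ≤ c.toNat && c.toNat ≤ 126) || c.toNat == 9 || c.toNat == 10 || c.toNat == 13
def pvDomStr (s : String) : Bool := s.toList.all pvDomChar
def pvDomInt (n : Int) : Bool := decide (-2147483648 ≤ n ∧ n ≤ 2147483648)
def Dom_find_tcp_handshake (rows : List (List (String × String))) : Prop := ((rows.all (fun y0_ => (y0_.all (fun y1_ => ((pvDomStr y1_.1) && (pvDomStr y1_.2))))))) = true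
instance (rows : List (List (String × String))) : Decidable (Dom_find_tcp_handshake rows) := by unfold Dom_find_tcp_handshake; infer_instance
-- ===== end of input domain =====

-- B replaces A's online state-machine pass (None guards, continue/break) by an offline
-- index/slice computation: comprehension of all matching indices per stage, take the first,
-- slice past it; same O(n), different decomposition. B copies its list argument, so only the
-- return value is compared (neither mutates; a generator argument is consumed by both).


-- ===== PORT A =====
-- shared module helpers (used verbatim by both Pythons)
def pvS (row : List (String × String)) (key : String) : String :=
  let v := PySem.Dict.getD (PySem.Dict.mk row) key ""
  if v ≠ "" then PySem.Str.strip v else ""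

def pvIsTrue (v : String) : Bool :=
  let w := PySem.Str.lower (PySem.Str.strip v)
  w == "1" || w == "true" || w == "yes"

def pvIsSyn (row : List (String × String)) : Bool :=
  pvIsTrue (pvS row "tcp.flags.syn") && !pvIsTrue (pvS row "tcp.flags.ack")

def pvIsSynack (row : List (String × String)) : Bool :=
  pvIsTrue (pvS row "tcp.flags.syn") && pvIsTrue (pvS row "tcp.flags.ack")

def pvIsAckOnly (row : List (String × String)) : Bool :=
  !pvIsTrue (pvS row "tcp.flags.syn") && pvIsTrue (pvS row "tcp.flags.ack")

def pvSameDir (row : List (String × String)) (srcip srcport dstip dstport : String) : Bool :=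
  pvS row "ip.src" == srcip && pvS row "tcp.srcport" == srcport &&
  pvS row "ip.dst" == dstip && pvS row "tcp.dstport" == dstport

-- A's loop: one pass with Optional state, `continue` after each capture, `break` on the ACK
def pvGoA (rows : List (List (String × String)))
    (syn synack ack : Option (List (String × String)))
    (cip cpt sip spt : Option String) :
    (Option (List (String × String))) × (Option (List (String × String))) × (Option (List (String × String))) × Option String × Option String × Option String × Option String :=
  match rows with
  | [] => (syn, synack, ack, cip, cpt, sip, spt)
  | row :: rest =>
    if syn.isNone && pvIsSyn row then
      pvGoA rest (some row) synack ack
        (some (pvS row "ip.src")) (some (pvS row "tcp.srcport"))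
        (some (pvS row "ip.dst")) (some (pvS row "tcp.dstport"))
    else if syn.isSome && synack.isNone && pvIsSynack row &&
        pvSameDir row (sip.getD "") (spt.getD "") (cip.getD "") (cpt.getD "") then
      pvGoA rest syn (some row) ack cip cpt sip spt
    else if synack.isSome && ack.isNone && pvIsAckOnly row &&
        pvSameDir row (cip.getD "") (cpt.getD "") (sip.getD "") (spt.getD "") then
      (syn, synack, some row, cip, cpt, sip, spt)  -- break
    else
      pvGoA rest syn synack ack cip cpt sip spt

def find_tcp_handshake (rows : List (List (String × String))) := pvGoA rows none none none none none none none

-- ===== PORT B =====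
-- B's `_first_index`: filter ALL matching indices out of range(len(xs)), take the head.
-- xs[i] for i ∈ range(len(xs)) is always in range, so `getD i []` is exact here.
def pvFirstIndex (xs : List (List (String × String))) (pred : List (String × String) → Bool) : Option Nat :=
  let hits := (List.range xs.length).filter (fun i => pred (xs.getD i []))
  match hits with
  | [] => none
  | i :: _ => some i

def find_tcp_handshake_alt (rows : List (List (String × String))) :
    (Option (List (String × String))) × (Option (List (String × String))) × (Option (List (String × String))) × Option String × Option String × Option String × Option String :=
  match pvFirstIndex rows pvIsSyn with
  | none => (none, none, none, none, none, none, none)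
  | some i =>
    let syn := rows.getD i []
    let cip := pvS syn "ip.src"
    let cpt := pvS syn "tcp.srcport"
    let sip := pvS syn "ip.dst"
    let spt := pvS syn "tcp.dstport"
    let tail := rows.drop (i + 1)   -- rows[i+1:]
    match pvFirstIndex tail (fun r => pvIsSynack r && pvSameDir r sip spt cip cpt) with
    | none => (some syn, none, none, some cip, some cpt, some sip, some spt)
    | some j =>
      let synack := tail.getD j []
      let tail2 := tail.drop (j + 1)   -- tail[j+1:]
      match pvFirstIndex tail2 (fun r => pvIsAckOnly r && pvSameDir r cip cpt sip spt) with
      | none => (some syn, some synack, none, some cip, some cpt, some sip, some spt)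
      | some k => (some syn, some synack, some (tail2.getD k []), some cip, some cpt, some sip, some spt)

-- ===== PRECONDITION & SPEC =====
def Spec_find_tcp_handshake (rows : List (List (String × String))) (out : (Option (List (String × String))) × (Option (List (String × String))) × (Option (List (String × String))) × Option String × Option String × Option String × Option String) : Prop := out = find_tcp_handshake_alt rows
instance (rows : List (List (String × String))) (out : (Option (List (String × String))) × (Option (List (String × String))) × (Option (List (String × String))) × Option String × Option String × Option String × Option String) : Decidable (Spec_find_tcp_handshake rows out) := by
  unfold Spec_find_tcp_handshake
  haveI : DecidableEq (Option String × Option String × Option String × Option String) := inferInstance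
  haveI : DecidableEq (Option (List (String × String)) × Option String × Option String × Option String × Option String) := inferInstance
  haveI : DecidableEq (Option (List (String × String)) × Option (List (String × String)) × Option String × Option String × Option String × Option String) := inferInstance
  infer_instance

-- ===== CLAIM (what is proved, stated in full; the proofs are below) =====
def Claim_equal_find_tcp_handshake : Prop := ∀ (rows : List (List (String × String))), Dom_find_tcp_handshake rows → Spec_find_tcp_handshake rows (find_tcp_handshake rows)

-- ===== LEMMAS AND PROOFS =====

-- the first-match view of B's pvFirstIndex: element found and the remaining suffix
theorem pvFirstIndex_cons (r : List (String × String)) (rest : List (List (String × String)))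
    (pred : List (String × String) → Bool) :
    pvFirstIndex (r :: rest) pred =
      if pred r then some 0 else (pvFirstIndex rest pred).map (· + 1) := by
  simp only [pvFirstIndex, List.length_cons, List.range_succ_eq_map, List.filter_cons,
    List.getD_cons_zero, List.filter_map]
  by_cases h : pred r = true
  · simp [h]
  · simp only [h]
    have : (fun i => pred ((r :: rest).getD i [])) ∘ Nat.succ = fun i => pred (rest.getD i []) := by
      funext i; simp [Function.comp]
    rw [this]
    cases hf : (List.range rest.length).filter (fun i => pred (rest.getD i [])) <;>
      simp [List.getD] at hf ⊢

-- Phase 3: with SYN and SYN-ACK captured, A's loop returns the first matching ACK of the suffix.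
theorem pvGoA_phase3 (rows : List (List (String × String)))
    (r1 r2 : List (String × String)) (cip cpt sip spt : String) :
    pvGoA rows (some r1) (some r2) none (some cip) (some cpt) (some sip) (some spt) =
    match pvFirstIndex rows (fun r => pvIsAckOnly r && pvSameDir r cip cpt sip spt) with
    | none => (some r1, some r2, none, some cip, some cpt, some sip, some spt)
    | some k => (some r1, some r2, some (rows.getD k []), some cip, some cpt, some sip, some spt) := by
  induction rows with
  | nil => simp [pvGoA, pvFirstIndex]
  | cons row rest ih =>
    rw [pvFirstIndex_cons]
    simp only [pvGoA, Option.isNone, Option.isSome, Option.getD]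
    by_cases h : (pvIsAckOnly row && pvSameDir row cip cpt sip spt) = true
    · simp [h]
    · simp only [h, if_neg, Bool.false_eq_true, not_false_iff, ih]
      cases pvFirstIndex rest (fun r => pvIsAckOnly r && pvSameDir r cip cpt sip spt) <;>
        simp [h]

-- Phase 2: with the SYN captured, A's loop finds the first matching SYN-ACK, then enters phase 3.
theorem pvGoA_phase2 (rows : List (List (String × String)))
    (r1 : List (String × String)) (cip cpt sip spt : String) :
    pvGoA rows (some r1) none none (some cip) (some cpt) (some sip) (some spt) =
    match pvFirstIndex rows (fun r => pvIsSynack r && pvSameDir r sip spt cip cpt) with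
    | none => (some r1, none, none, some cip, some cpt, some sip, some spt)
    | some j =>
      pvGoA (rows.drop (j + 1)) (some r1) (some (rows.getD j [])) none
        (some cip) (some cpt) (some sip) (some spt) := by
  induction rows with
  | nil => simp [pvGoA, pvFirstIndex]
  | cons row rest ih =>
    rw [pvFirstIndex_cons]
    simp only [pvGoA, Option.isNone, Option.isSome, Option.getD]
    by_cases h : (pvIsSynack row && pvSameDir row sip spt cip cpt) = true
    · simp [h]
    · simp only [h, if_neg, Bool.false_eq_true, not_false_iff, ih]
      cases pvFirstIndex rest (fun r => pvIsSynack r && pvSameDir r sip spt cip cpt) <;>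
        simp [h]

-- Phase 1: from the initial all-None state, A's loop finds the first SYN.
theorem pvGoA_phase1 (rows : List (List (String × String))) :
    pvGoA rows none none none none none none none =
    match pvFirstIndex rows pvIsSyn with
    | none => (none, none, none, none, none, none, none)
    | some i =>
      pvGoA (rows.drop (i + 1)) (some (rows.getD i [])) none none
        (some (pvS (rows.getD i []) "ip.src")) (some (pvS (rows.getD i []) "tcp.srcport"))
        (some (pvS (rows.getD i []) "ip.dst")) (some (pvS (rows.getD i []) "tcp.dstport")) := by
  induction rows with
  | nil => simp [pvGoA, pvFirstIndex]
  | cons row rest ih =>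
    rw [pvFirstIndex_cons]
    simp only [pvGoA, Option.isNone, Option.isSome]
    by_cases h : pvIsSyn row = true
    · simp [h]
    · simp only [h, if_neg, Bool.false_eq_true, not_false_iff, ih]
      cases pvFirstIndex rest pvIsSyn <;> simp

-- ===== VERDICT (by name: the statement is the Claim_ definition above) =====
theorem find_tcp_handshake_spec : Claim_equal_find_tcp_handshake := by
  intro rows _
  unfold Spec_find_tcp_handshake find_tcp_handshake find_tcp_handshake_alt
  rw [pvGoA_phase1]
  cases h1 : pvFirstIndex rows pvIsSyn with
  | none => rfl
  | some i =>
    simp only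
    rw [pvGoA_phase2]
    cases h2 : pvFirstIndex (rows.drop (i + 1))
        (fun r => pvIsSynack r && pvSameDir r (pvS (rows.getD i []) "ip.dst") (pvS (rows.getD i []) "tcp.dstport") (pvS (rows.getD i []) "ip.src") (pvS (rows.getD i []) "tcp.srcport")) with
    | none => rfl
    | some j =>
      simp only
      rw [pvGoA_phase3]
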